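-- pv_equiv track=rewrite | github.com/horacecc/algorithm | LeetCode/0819.py | mostCommonWord
-- ===== SOURCE A (Python) =====
-- from typing import List
--
-- def mostCommonWord(paragraph: str, banned: List[str]) -> str:
--     ban = set(banned)
--     cnt = {}
--     w = []
--     res = ''
--     mx = 0
--     for c in paragraph.lower() + ' ':
--         if c.isalpha():
--             w.append(c)
--         elif w:
--             word = ''.join(w)
--             w = []
--             if word not in ban:
--                 cnt[word] = cnt.get(word, 0) + 1
--                 if cnt[word] > mx:
--                     mx = cnt[word]
--                     res = word
--     return res
-- ===== SOURCE B (Python) =====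
-- from typing import List
--
-- def mostCommonWord(paragraph: str, banned: List[str]) -> str:
--     # pass 1: tokenize — map every non-letter to a space, then whitespace-split
--     words = ''.join(c if c.isalpha() else ' ' for c in paragraph.lower()).split()
--     ban = set(banned)
--     # pass 2: count, remembering the first word to exceed the running maximum
--     cnt = {}
--     res = ''
--     mx = 0
--     for word in words:
--         if word not in ban:
--             c = cnt.get(word, 0) + 1
--             cnt[word] = c
--             if c > mx:
--                 mx = c
--                 res = word
--     return res
-- ===== Notes on version B (the rewrite author's own statement) =====
-- stated objective: alternative
-- what changed: A counts words inside a single interleaved character loop that builds the current word while updating counts; B separates the two concerns into a tokenizing pass (map every non-letter of the lowered text to a space, then whitespace-split) followed by a counting pass over the word list that keeps the first word to strictly exceed the running maximum.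
import Mathlib
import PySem

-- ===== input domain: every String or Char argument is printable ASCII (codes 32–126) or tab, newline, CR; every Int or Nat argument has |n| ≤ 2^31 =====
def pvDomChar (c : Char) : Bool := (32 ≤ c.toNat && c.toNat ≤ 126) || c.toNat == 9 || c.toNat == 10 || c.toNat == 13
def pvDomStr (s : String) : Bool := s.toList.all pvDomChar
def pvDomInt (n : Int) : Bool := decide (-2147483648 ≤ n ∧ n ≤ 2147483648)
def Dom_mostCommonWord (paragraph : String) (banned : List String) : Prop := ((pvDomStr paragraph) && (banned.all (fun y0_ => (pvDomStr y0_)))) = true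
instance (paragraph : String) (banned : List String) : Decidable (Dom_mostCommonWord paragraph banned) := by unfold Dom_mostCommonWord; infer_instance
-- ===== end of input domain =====

-- B re-implements the same return value by separating tokenization (map non-letters to space, split on
-- whitespace) from counting (one pass over the word list with a strict-> running maximum); alternative
-- decomposition, not claimed faster.

-- ===== PORT A =====
-- loop body of A's single interleaved character loop; state = (cnt, w, res, mx)
def pvStepA (ban : PySem.Set String) (st : PySem.Dict String Int × List Char × String × Int)
    (c : Char) : PySem.Dict String Int × List Char × String × Int :=
  match st with
  | (cnt, w, res, mx) =>
    if PySem.Chars.isalpha c then (cnt, w ++ [c], res, mx)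
    else if w ≠ [] then
      let word := String.mk w
      if ¬ ban.contains word then
        let cnt2 := cnt.insert word (cnt.getD word 0 + 1)
        if cnt2.getD word 0 > mx then (cnt2, [], word, cnt2.getD word 0)
        else (cnt2, [], res, mx)
      else (cnt, [], res, mx)
    else st

def mostCommonWord (paragraph : String) (banned : List String) : String :=
  let ban := PySem.Set.ofList banned
  ((PySem.Chars.lower paragraph.toList ++ [' ']).foldl (pvStepA ban)
    (PySem.Dict.empty, [], "", 0)).2.2.1

-- ===== PORT B =====
-- Source B's 'c if c.isalpha() else ' '' tokenizing map
def pvClean (c : Char) : Char := if PySem.Chars.isalpha c then c else ' '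

-- loop body of Source B's counting pass; state = (cnt, res, mx)
def pvCountB (ban : PySem.Set String) (st : PySem.Dict String Int × String × Int)
    (word : String) : PySem.Dict String Int × String × Int :=
  if ban.contains word then st
  else
    let c := st.1.getD word 0 + 1
    let cnt := st.1.insert word c
    if c > st.2.2 then (cnt, word, c) else (cnt, st.2.1, st.2.2)

def mostCommonWord_alt (paragraph : String) (banned : List String) : String :=
  let cleaned := (PySem.Chars.lower paragraph.toList).map pvClean
  let words := (PySem.Chars.split₀ cleaned).map String.mk
  let ban := PySem.Set.ofList banned
  (words.foldl (pvCountB ban) (PySem.Dict.empty, "", 0)).2.1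

-- ===== PRECONDITION & SPEC =====
def Spec_mostCommonWord (paragraph : String) (banned : List String) (out : String) : Prop := out = mostCommonWord_alt paragraph banned
instance (paragraph : String) (banned : List String) (out : String) : Decidable (Spec_mostCommonWord paragraph banned out) := by unfold Spec_mostCommonWord; infer_instance

-- ===== CLAIM (what is proved, stated in full; the proofs are below) =====
def Claim_equal_mostCommonWord : Prop := ∀ (paragraph : String) (banned : List String), Dom_mostCommonWord paragraph banned → Spec_mostCommonWord paragraph banned (mostCommonWord paragraph banned)

-- ===== LEMMAS AND PROOFS =====

-- split₀.go's third argument is an accumulator of already-reversed words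
lemma pvGoAcc (s : List Char) : ∀ (cur : List Char) (acc : List (List Char)),
    PySem.Chars.split₀.go s cur acc = acc.reverse ++ PySem.Chars.split₀.go s cur [] := by
  induction s with
  | nil =>
    intro cur acc
    simp only [PySem.Chars.split₀.go]
    split <;> simp
  | cons c rest ih =>
    intro cur acc
    simp only [PySem.Chars.split₀.go]
    split
    · split
      · exact ih [] acc
      · rw [ih [] (cur.reverse :: acc), ih [] [cur.reverse]]
        simp
    · exact ih (c :: cur) acc

-- a letter is never a space
lemma pvAlphaNotSpace (c : Char) (h : PySem.Chars.isalpha c = true) :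
    PySem.Chars.isspace c = false := by
  simp only [PySem.Chars.isalpha, PySem.Chars.isupper, PySem.Chars.islower, Bool.or_eq_true,
    Bool.and_eq_true, decide_eq_true_eq, Char.le_def, UInt32.le_iff_toNat_le] at h
  have e1 : 'A'.val.toNat = 65 := rfl
  have e2 : 'Z'.val.toNat = 90 := rfl
  have e3 : 'a'.val.toNat = 97 := rfl
  have e4 : 'z'.val.toNat = 122 := rfl
  simp only [PySem.Chars.isspace, Char.toNat]
  simp only [Bool.or_eq_false_iff, Bool.and_eq_false_iff, decide_eq_false_iff_not]
  omega

-- A's flush step is B's counting step (plus emptying the current word)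
lemma pvFlush (ban : PySem.Set String) (cnt : PySem.Dict String Int) (w : List Char)
    (res : String) (mx : Int) (hw : w ≠ []) :
    pvStepA ban (cnt, w, res, mx) ' ' =
      ((pvCountB ban (cnt, res, mx) (String.mk w)).1, [],
       (pvCountB ban (cnt, res, mx) (String.mk w)).2.1,
       (pvCountB ban (cnt, res, mx) (String.mk w)).2.2) := by
  have hsp : PySem.Chars.isalpha ' ' = false := by decide
  simp [pvStepA, pvCountB, hsp, hw]
  split_ifs <;> rfl

-- the heart of the proof: A's interleaved character loop over cs + ' ' equals
-- B's counting pass over the tokens split₀ extracts from the cleaned characters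
lemma pvMain (cs : List Char) : ∀ (ban : PySem.Set String) (cnt : PySem.Dict String Int)
    (w : List Char) (res : String) (mx : Int),
    ((cs ++ [' ']).foldl (pvStepA ban) (cnt, w, res, mx)).2.2.1
      = (((PySem.Chars.split₀.go (cs.map pvClean) w.reverse []).map String.mk).foldl
          (pvCountB ban) (cnt, res, mx)).2.1 := by
  induction cs with
  | nil =>
    intro ban cnt w res mx
    have hsp : PySem.Chars.isalpha ' ' = false := by decide
    simp only [List.nil_append, List.foldl_cons, List.foldl_nil, List.map_nil,
      PySem.Chars.split₀.go]
    by_cases hw : w = []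
    · subst hw; simp [pvStepA, hsp]
    · rw [pvFlush ban cnt w res mx hw]
      simp [hw]
  | cons c rest ih =>
    intro ban cnt w res mx
    simp only [List.cons_append, List.foldl_cons, List.map_cons, PySem.Chars.split₀.go]
    by_cases ha : PySem.Chars.isalpha c = true
    · have hcl : pvClean c = c := by simp [pvClean, ha]
      have hsp := pvAlphaNotSpace c ha
      rw [hcl]
      simp only [hsp, Bool.false_eq_true, if_false]
      have hst : pvStepA ban (cnt, w, res, mx) c = (cnt, w ++ [c], res, mx) := by
        simp [pvStepA, ha]
      rw [hst]
      have hrev : c :: w.reverse = (w ++ [c]).reverse := by simp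
      rw [hrev]
      exact ih ban cnt (w ++ [c]) res mx
    · have hcl : pvClean c = ' ' := by simp [pvClean, ha]
      have hsp : PySem.Chars.isspace ' ' = true := by decide
      have hsp' : PySem.Chars.isalpha ' ' = false := by decide
      rw [hcl]
      simp only [hsp, if_true]
      by_cases hw : w = []
      · subst hw
        have hst : pvStepA ban (cnt, [], res, mx) c = (cnt, [], res, mx) := by
          simp [pvStepA, ha]
        rw [hst]
        simpa using ih ban cnt [] res mx
      · have hc : pvStepA ban (cnt, w, res, mx) c = pvStepA ban (cnt, w, res, mx) ' ' := by
          simp [pvStepA, ha, hsp']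
        rw [hc, pvFlush ban cnt w res mx hw]
        simp only [List.isEmpty_iff, List.reverse_eq_nil_iff, hw, if_false]
        rw [pvGoAcc]
        simp only [List.reverse_cons, List.reverse_nil, List.nil_append, List.reverse_reverse,
          List.map_cons, List.foldl_append, List.foldl_cons, List.foldl_nil,
          List.singleton_append]
        have := ih ban (pvCountB ban (cnt, res, mx) (String.mk w)).1 []
          (pvCountB ban (cnt, res, mx) (String.mk w)).2.1
          (pvCountB ban (cnt, res, mx) (String.mk w)).2.2
        simpa using this

-- ===== VERDICT (by name: the statement is the Claim_ definition above) =====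
theorem mostCommonWord_spec : Claim_equal_mostCommonWord := by
  intro paragraph banned _
  unfold Spec_mostCommonWord mostCommonWord mostCommonWord_alt PySem.Chars.split₀
  simpa using pvMain (PySem.Chars.lower paragraph.toList) (PySem.Set.ofList banned)
    PySem.Dict.empty [] "" 0
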